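-- pv_equiv track=rewrite | github.com/gould7789/study_practice | programmers/str_count4.py | solution
-- ===== SOURCE A (Python) =====
-- def solution(myString, pat):
--     word = ""
--     count = 0
--
--     # vanilla
--     for c in myString:
--         word += c
--         if pat in word:
--             count += 1
--             word = word[-(len(pat)-1):]
--
--     # 슬라이싱
--     for i in range(len(myString)):
--         if myString[i:i+len(pat)] == pat:
--             count += 1
--
--     return count
-- ===== SOURCE B (Python) =====
-- def solution(myString, pat):
--     n, m = len(myString), len(pat)
--     occ = 0
--     for i in range(n - m + 1):
--         if myString.startswith(pat, i):
--             occ += 1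
--     return 2 * occ
-- ===== Notes on version B (the rewrite author's own statement) =====
-- stated objective: faster
-- what changed: Replaces A's two passes (a stateful growing-word loop with repeated 'pat in word' substring checks, plus a slicing loop) by a single left-to-right scan counting pattern occurrences with str.startswith and returning twice that count, since both of A's passes count the same overlapping occurrences.
-- intended difference: For pat of length <= 1 A's word-reset slice word[-(len(pat)-1):] keeps the whole word, so A returns len(s) extra counts after the first match (2*len(s) for empty pat): on empty pat and on single-char pat whose first occurrence is followed by some different character, B returns twice the true occurrence count, the intended value. — e.g. on solution("ab", "a"): A returns 3, B returns 2
import Mathlib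
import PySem

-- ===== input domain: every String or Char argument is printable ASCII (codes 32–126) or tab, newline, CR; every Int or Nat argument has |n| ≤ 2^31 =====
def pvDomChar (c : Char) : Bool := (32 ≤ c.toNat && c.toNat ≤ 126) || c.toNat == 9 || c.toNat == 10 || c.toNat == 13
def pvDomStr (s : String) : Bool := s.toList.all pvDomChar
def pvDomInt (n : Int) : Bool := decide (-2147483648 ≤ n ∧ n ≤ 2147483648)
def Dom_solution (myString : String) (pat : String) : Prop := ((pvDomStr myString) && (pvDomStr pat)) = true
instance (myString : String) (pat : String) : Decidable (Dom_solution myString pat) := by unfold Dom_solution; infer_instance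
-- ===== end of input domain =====

-- B replaces A's two quadratic-ish passes by one startswith scan counting occurrences, returning twice the count (objective: faster).

-- ===== PORT A =====
-- A's first loop body: word += c; if pat in word: count += 1; word = word[-(len(pat)-1):]
def stepA (p : List Char) (st : List Char × Int) (c : Char) : List Char × Int :=
  let word := st.1 ++ [c]
  if PySem.Chars.isIn p word = true then
    (PySem.List.slice word (some (-((p.length : Int) - 1))) none, st.2 + 1)
  else
    (word, st.2)

def solution (myString : String) (pat : String) : Int :=
  let s := myString.toList
  let p := pat.toList
  -- vanilla: for c in myString
  let r1 := s.foldl (stepA p) ([], 0)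
  -- slicing: for i in range(len(myString)): if myString[i:i+len(pat)] == pat: count += 1
  (PySem.List.pyRange 0 (s.length : Int) 1).foldl
    (fun count i =>
      if PySem.List.slice s (some i) (some (i + (p.length : Int))) = p then count + 1 else count)
    r1.2

-- ===== PORT B =====
def solution_alt (myString : String) (pat : String) : Int :=
  let s := myString.toList
  let p := pat.toList
  -- for i in range(n - m + 1): if myString.startswith(pat, i): occ += 1
  -- myString.startswith(pat, i) for 0 ≤ i is ported exactly as: pat prefix test on s dropped at i
  let occ := (PySem.List.pyRange 0 ((s.length : Int) - (p.length : Int) + 1) 1).foldl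
    (fun occ i => if PySem.Chars.startswith (s.drop i.toNat) p = true then occ + 1 else occ) 0
  2 * occ

-- ===== PRECONDITION & SPEC =====
-- For pat of length ≤ 1 A's word-reset slice word[-(len(pat)-1):] keeps the whole word, so after the
-- first match A keeps counting every remaining character (and counts 2*len(s) for empty pat): on empty
-- pat, and on single-char pat whose first occurrence is followed by some character different from it,
-- B instead returns twice the true occurrence count, the intended value.
def D_solution (myString : String) (pat : String) : Prop :=
  pat.toList = [] ∨
    (pat.toList.length = 1 ∧
      ((myString.toList.dropWhile (· ≠ pat.toList.headI)).any (· ≠ pat.toList.headI)) = true)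
instance (myString : String) (pat : String) : Decidable (D_solution myString pat) := by
  unfold D_solution; infer_instance

def Spec_solution (myString : String) (pat : String) (out : Int) : Prop :=
  ¬ D_solution myString pat → out = solution_alt myString pat
instance (myString : String) (pat : String) (out : Int) : Decidable (Spec_solution myString pat out) := by
  unfold Spec_solution; infer_instance

def pvDiffWitness_solution : String × String := ("ab", "a")
def pvDiffWitnessOut_solution : Int × Int := (3, 2)

-- ===== CLAIM (what is proved, stated in full; the proofs are below) =====
def Claim_unchanged_solution : Prop := ∀ (myString : String) (pat : String), Dom_solution myString pat → Spec_solution myString pat (solution myString pat)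
def Claim_changed_solution : Prop := Dom_solution (pvDiffWitness_solution.1) (pvDiffWitness_solution.2) ∧ D_solution (pvDiffWitness_solution.1) (pvDiffWitness_solution.2) ∧ solution (pvDiffWitness_solution.1) (pvDiffWitness_solution.2) = pvDiffWitnessOut_solution.1 ∧ solution_alt (pvDiffWitness_solution.1) (pvDiffWitness_solution.2) = pvDiffWitnessOut_solution.2 ∧ pvDiffWitnessOut_solution.1 ≠ pvDiffWitnessOut_solution.2

-- ===== LEMMAS AND PROOFS =====

theorem pv_suffix_of_suffix_length_le {p w t : List Char}
    (hp : p <:+ t) (hw : w <:+ t) (h : p.length ≤ w.length) : p <:+ w := by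
  rw [← List.reverse_prefix] at hp hw ⊢
  exact List.prefix_of_prefix_length_le hp hw (by simpa using h)

theorem pv_takedrop_eq_iff (s p : List Char) (k : Nat) :
    ((s.drop k).take p.length = p) ↔ p <+: s.drop k := by
  constructor
  · intro h; rw [← h]; exact List.take_prefix _ _
  · intro h; rw [List.prefix_iff_eq_take] at h; exact h.symm

theorem pv_countP_range_restrict (q : Nat → Bool) (k n : Nat) (hk : k ≤ n)
    (h : ∀ i, k ≤ i → q i = false) :
    (List.range n).countP q = (List.range k).countP q := by
  have : n = k + (n - k) := by omega
  rw [this, List.range_add, List.countP_append]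
  have hz : ((List.range (n - k)).map (k + ·)).countP q = 0 := by
    rw [List.countP_eq_zero]
    intro a ha
    simp only [List.mem_map, List.mem_range] at ha
    obtain ⟨b, _, rfl⟩ := ha
    simp [h (k + b) (by omega)]
  omega

theorem pv_infix_snoc {p w : List Char} {c : Char}
    (h : p <:+: w ++ [c]) (hn : ¬ p <:+: w) : p <:+ w ++ [c] := by
  obtain ⟨l, r, hlr⟩ := h
  rcases r.eq_nil_or_concat with rfl | ⟨r', d, rfl⟩
  · exact ⟨l, by simpa using hlr⟩
  · exfalso; apply hn
    have : w = l ++ p ++ r' := by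
      have := congrArg List.dropLast hlr
      simpa [List.dropLast_concat, ← List.append_assoc] using this.symm
    exact ⟨l, r', by simp [this]⟩

theorem pv_suffix_take_iff {s p : List Char} {j : Nat}
    (hm : 1 ≤ p.length) (hj : j < s.length) :
    p <:+ s.take (j + 1) ↔ (p.length ≤ j + 1 ∧ p <+: s.drop (j + 1 - p.length)) := by
  constructor
  · rintro ⟨l, hl⟩
    have hlen : l.length + p.length = j + 1 := by
      have := congrArg List.length hl
      simp [List.length_take] at this
      omega
    have hle : p.length ≤ j + 1 := by omega
    refine ⟨hle, ?_⟩
    have hlpre : l = s.take (j + 1 - p.length) := by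
      have h1 : l <+: s.take (j + 1) := ⟨p, hl⟩
      have h2 : l <+: s := h1.trans (List.take_prefix _ _)
      rw [List.prefix_iff_eq_take] at h2
      rw [h2]; congr 1; omega
    refine ⟨s.drop (j + 1), ?_⟩
    have hs : s = (l ++ p) ++ s.drop (j + 1) := by
      rw [hl]; exact (List.take_append_drop (j + 1) s).symm
    have hcalc : s.drop (j + 1 - p.length) = p ++ s.drop (j + 1) := by
      calc s.drop (j + 1 - p.length) = ((l ++ p) ++ s.drop (j + 1)).drop (j + 1 - p.length) := by rw [← hs]
        _ = p ++ s.drop (j + 1) := by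
            rw [List.drop_append_of_le_length (by simp; omega)]
            rw [List.drop_append_of_le_length (by omega)]
            have hll : l.length = j + 1 - p.length := by rw [hlpre]; simp [List.length_take]; omega
            simp [← hll]
    exact hcalc.symm
  · rintro ⟨hle, q, hq⟩
    refine ⟨s.take (j + 1 - p.length), ?_⟩
    have : j + 1 = (j + 1 - p.length) + p.length := by omega
    rw [this, List.take_add, ← hq, List.take_append_of_le_length (by simp)]
    simp


theorem pv_countP_eq_card (n : Nat) (q : Nat → Bool) :
    (List.range n).countP q = ((Finset.range n).filter (fun i => q i = true)).card := by
  rw [Finset.card_filter]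
  induction n with
  | zero => simp
  | succ k ih => rw [List.range_succ, List.countP_append, Finset.sum_range_succ, ih]; simp [List.countP_cons]

theorem pv_count_ends_eq_starts (s p : List Char) (hm : 1 ≤ p.length) :
    ((List.range s.length).countP fun j => decide (p <:+ s.take (j + 1))) =
    ((List.range s.length).countP fun i => decide (p <+: s.drop i)) := by
  rw [pv_countP_eq_card, pv_countP_eq_card]
  apply Finset.card_bij' (fun j _ => j + 1 - p.length) (fun i _ => i + p.length - 1)
  · intro j hj
    simp only [Finset.mem_filter, Finset.mem_range, decide_eq_true_eq] at hj ⊢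
    obtain ⟨hjn, hsuf⟩ := hj
    rw [pv_suffix_take_iff hm hjn] at hsuf
    exact ⟨by omega, hsuf.2⟩
  · intro i hi
    simp only [Finset.mem_filter, Finset.mem_range, decide_eq_true_eq] at hi ⊢
    obtain ⟨hin, hpre⟩ := hi
    have hlen : p.length ≤ s.length - i := by
      have := hpre.length_le; simpa using this
    have hjn : i + p.length - 1 < s.length := by omega
    refine ⟨hjn, ?_⟩
    rw [pv_suffix_take_iff hm hjn]
    constructor
    · omega
    · have : i + p.length - 1 + 1 - p.length = i := by omega
      rw [this]; exact hpre
  · intro j hj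
    simp only [Finset.mem_filter, Finset.mem_range, decide_eq_true_eq] at hj
    obtain ⟨hjn, hsuf⟩ := hj
    rw [pv_suffix_take_iff hm hjn] at hsuf
    omega
  · intro i hi
    simp only [Finset.mem_filter, Finset.mem_range, decide_eq_true_eq] at hi
    omega


theorem pv_loop2 (s p : List Char) (a : Int) :
    (PySem.List.pyRange 0 (s.length : Int) 1).foldl
      (fun count i =>
        if PySem.List.slice s (some i) (some (i + (p.length : Int))) = p then count + 1 else count) a
    = a + ((List.range s.length).countP fun i => decide (p <+: s.drop i)) := by
  rw [PySem.List.pyRange_zero_natCast, List.foldl_map]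
  rw [PySem.List.foldl_ite_add_one (fun k : Nat => PySem.List.slice s (some (k:Int)) (some ((k:Int) + (p.length:Int))) = p)]
  congr 2
  apply List.countP_congr
  intro k _
  simp only [PySem.List.slice_natCast_add, decide_eq_true_eq]
  exact pv_takedrop_eq_iff s p k

theorem pv_loopB (s p : List Char) (hm : 1 ≤ p.length) :
    (PySem.List.pyRange 0 ((s.length : Int) - (p.length : Int) + 1) 1).foldl
      (fun occ i => if PySem.Chars.startswith (s.drop i.toNat) p = true then occ + 1 else occ) (0 : Int)
    = (((List.range s.length).countP fun i => decide (p <+: s.drop i) : Nat) : Int) := by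
  have key : ∀ i : Nat, (p <+: s.drop i) → i + p.length ≤ s.length := by
    intro i h
    have := h.length_le
    simp [List.length_drop] at this
    omega
  by_cases hn : p.length ≤ s.length
  · have hcast : (s.length : Int) - (p.length : Int) + 1 = ((s.length - p.length + 1 : Nat) : Int) := by push_cast; omega
    rw [hcast, PySem.List.pyRange_zero_natCast]
    simp only [List.foldl_map]
    simp only [PySem.List.foldl_if_add_one]
    rw [pv_countP_range_restrict _ (s.length - p.length + 1) s.length (by omega)
      (fun i hi => by
        simp only [decide_eq_false_iff_not]
        intro hpre
        have := key i hpre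
        omega)]
    simp only [Int.toNat_natCast, zero_add]
    congr 1
    apply List.countP_congr
    intro k _
    rw [show (PySem.Chars.startswith (s.drop k) p) = decide (p <+: s.drop k) by
      by_cases h : p <+: s.drop k
      · simp [h, (PySem.Chars.startswith_iff _ _).mpr h]
      · rw [decide_eq_false h, Bool.eq_false_iff]
        intro hc
        exact h ((PySem.Chars.startswith_iff _ _).mp hc)]
  · have hempty : PySem.List.pyRange 0 ((s.length : Int) - (p.length : Int) + 1) 1 = [] := by
      rw [PySem.List.pyRange_of_pos _ _ (by norm_num : (0:Int) < 1)]
      rw [if_neg (by omega)]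
      simp
    rw [hempty]
    simp only [List.foldl_nil]
    have hz : List.countP (fun i => decide (p <+: s.drop i)) (List.range s.length) = 0 := by
      rw [List.countP_eq_zero]
      intro i hi
      simp only [List.mem_range] at hi
      simp only [decide_eq_true_eq]
      intro hpre
      have := key i hpre
      omega
    rw [hz]
    simp


theorem pv_loop1_one (p : List Char) (hm : p.length = 1) :
    ∀ (r t : List Char) (cnt : Int),
      (List.foldl (stepA p) (t, cnt) r).2
        = cnt + ((List.range r.length).countP fun j =>
            PySem.Chars.isIn p ((t ++ r).take (t.length + (j + 1)))) := by
  intro r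
  induction r with
  | nil => intro t cnt; simp
  | cons c r ih =>
    intro t cnt
    have hstep : stepA p (t, cnt) c
        = (t ++ [c], if PySem.Chars.isIn p (t ++ [c]) = true then cnt + 1 else cnt) := by
      unfold stepA
      simp only [hm]
      norm_num
      split_ifs with h
      · rfl
      · rfl
    have htake0 : (t ++ c :: r).take (t.length + 1) = t ++ [c] := by
      rw [show t ++ c :: r = (t ++ [c]) ++ r by simp]
      rw [List.take_append_of_le_length (by simp)]
      simp
    rw [List.foldl_cons, hstep]
    rw [show ∀ b : Int, (List.foldl (stepA p) (t ++ [c], b) r).2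
        = b + ((List.range r.length).countP fun j =>
            PySem.Chars.isIn p (((t ++ [c]) ++ r).take ((t ++ [c]).length + (j + 1)))) from fun b => ih (t ++ [c]) b]
    rw [List.length_cons, List.range_succ_eq_map, List.countP_cons, List.countP_map]
    have hc : ∀ j : Nat, ((fun j => PySem.Chars.isIn p (List.take (t.length + (j + 1)) (t ++ c :: r))) ∘ Nat.succ) j
        = (fun j => PySem.Chars.isIn p (List.take ((t ++ [c]).length + (j + 1)) (t ++ [c] ++ r))) j := by
      intro j
      simp only [Function.comp_apply, List.length_append, List.length_cons, List.length_nil]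
      rw [show t ++ [c] ++ r = t ++ c :: r by simp]
      congr 2
      omega
    rw [funext hc]
    rw [show t.length + (0 + 1) = t.length + 1 by omega, htake0]
    split_ifs with h <;> push_cast <;> ring


theorem pv_isIn_take_iff_suffix (s : List Char) (c : Char) (j : Nat)
    (hshape : ((s.dropWhile (· ≠ c)).any (· ≠ c)) = false) (hj : j < s.length) :
    PySem.Chars.isIn [c] (s.take (j + 1)) = decide ([c] <:+ s.take (j + 1)) := by
  have hiff : PySem.Chars.isIn [c] (s.take (j + 1)) = true ↔ c ∈ s.take (j + 1) := by
    rw [PySem.Chars.isIn_iff_infix]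
    constructor
    · intro h; exact h.subset (by simp)
    · intro h
      obtain ⟨l1, l2, hl⟩ := List.append_of_mem h
      exact ⟨l1, l2, by simp [hl]⟩
  by_cases hmem : c ∈ s.take (j + 1)
  · have hsuf : [c] <:+ s.take (j + 1) := by
      have hsplit : s = s.takeWhile (· ≠ c) ++ s.dropWhile (· ≠ c) := (List.takeWhile_append_dropWhile).symm
      set a := s.takeWhile (· ≠ c) with hadef
      set b := s.dropWhile (· ≠ c) with hbdef
      have hb : ∀ x ∈ b, x = c := by
        intro x hx
        have := List.any_eq_false.mp hshape x hx
        simpa using this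
      have hbrep : b = List.replicate b.length c := List.eq_replicate_of_mem hb
      have ha : ∀ x ∈ a, x ≠ c := by
        intro x hx
        have := List.mem_takeWhile_imp hx
        simpa using this
      have hslen : s.length = a.length + b.length := by
        rw [hsplit]; simp
      have hlen : a.length < j + 1 := by
        by_contra hle
        have hca : c ∈ a :=
          List.take_subset _ _ (by rwa [hsplit, List.take_append_of_le_length (by omega)] at hmem)
        exact ha c hca rfl
      have htake : s.take (j + 1) = a ++ List.replicate (j + 1 - a.length) c := by
        rw [hsplit, List.take_append, List.take_of_length_le (by omega), hbrep, List.take_replicate]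
        congr 2
        omega
      refine ⟨a ++ List.replicate (j + 1 - a.length - 1) c, ?_⟩
      rw [htake, show j + 1 - a.length = (j + 1 - a.length - 1) + 1 by omega, List.replicate_succ']
      simp
    rw [hiff.mpr hmem, decide_eq_true hsuf]
  · have h1 : PySem.Chars.isIn [c] (s.take (j + 1)) = false := by
      rw [← Bool.not_eq_true, hiff]; exact hmem
    have h2 : ¬ ([c] <:+ s.take (j + 1)) := fun h => hmem (h.subset (by simp))
    rw [h1, decide_eq_false h2]


theorem pv_loop1 (p : List Char) (hm : 2 ≤ p.length) :
    ∀ (r t w : List Char) (cnt : Int),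
      w <:+ t → (w = t ∨ p.length - 1 ≤ w.length) → ¬ p <:+: w →
      (List.foldl (stepA p) (w, cnt) r).2
        = cnt + ((List.range r.length).countP fun j =>
            decide (p <:+ (t ++ r).take (t.length + (j + 1)))) := by
  intro r
  induction r with
  | nil => intro t w cnt _ _ _; simp
  | cons c r ih =>
    intro t w cnt hwt hinv hnin
    have hwt' : w ++ [c] <:+ t ++ [c] := by
      obtain ⟨u, hu⟩ := hwt
      exact ⟨u, by rw [← List.append_assoc, hu]⟩
    have ht'r : t ++ c :: r = (t ++ [c]) ++ r := by simp
    have htake0 : (t ++ c :: r).take (t.length + (0 + 1)) = t ++ [c] := by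
      rw [ht'r, List.take_append_of_le_length (by simp)]
      simp
    have hshift : ∀ j : Nat,
        ((fun j => decide (p <:+ (t ++ c :: r).take (t.length + (j + 1)))) ∘ Nat.succ) j
        = (fun j => decide (p <:+ ((t ++ [c]) ++ r).take ((t ++ [c]).length + (j + 1)))) j := by
      intro j
      simp only [Function.comp_apply]
      rw [ht'r]
      congr 2
      simp
      omega
    rw [List.foldl_cons, List.length_cons, List.range_succ_eq_map, List.countP_cons,
        List.countP_map, funext hshift]
    by_cases h : PySem.Chars.isIn p (w ++ [c]) = true
    · have hinf : p <:+: w ++ [c] := (PySem.Chars.isIn_iff_infix _ _).mp h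
      have hsufw' : p <:+ w ++ [c] := pv_infix_snoc hinf hnin
      have hlenw' : p.length ≤ (w ++ [c]).length := hsufw'.length_le
      have hsuft' : p <:+ t ++ [c] := hsufw'.trans hwt'
      have hstep : stepA p (w, cnt) c
          = ((w ++ [c]).drop ((w ++ [c]).length - (p.length - 1)), cnt + 1) := by
        unfold stepA
        rw [if_pos h]
        have hcast : -((p.length : Int) - 1) = -(((p.length - 1 : Nat)) : Int) := by omega
        rw [hcast, PySem.List.slice_from_neg_natCast _ _ (by omega)]
      rw [hstep]
      rw [ih (t ++ [c]) _ (cnt + 1)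
        ((List.drop_suffix _ _).trans hwt')
        (Or.inr (by
          have h1 : (w ++ [c]).length = w.length + 1 := by simp
          rw [List.length_drop]
          omega))
        (fun hcon => by
          have h2 := hcon.length_le
          rw [List.length_drop] at h2
          have h1 : (w ++ [c]).length = w.length + 1 := by simp
          rw [h1] at h2 hlenw'
          omega)]
      rw [htake0, decide_eq_true hsuft']
      simp only [if_true]
      push_cast
      ring
    · have hnin' : ¬ p <:+: w ++ [c] := fun hc => h ((PySem.Chars.isIn_iff_infix _ _).mpr hc)
      have hstep : stepA p (w, cnt) c = (w ++ [c], cnt) := by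
        unfold stepA
        rw [if_neg h]
      have hnsuf : ¬ p <:+ t ++ [c] := by
        intro hsuf
        rcases hinv with rfl | hlen
        · exact hnin' hsuf.isInfix
        · exact hnin' (pv_suffix_of_suffix_length_le hsuf hwt' (by simp; omega)).isInfix
      rw [hstep]
      have hinv' : w ++ [c] = t ++ [c] ∨ p.length - 1 ≤ (w ++ [c]).length := by
        rcases hinv with rfl | hlen
        · exact Or.inl rfl
        · right; simp; omega
      rw [ih (t ++ [c]) _ cnt hwt' hinv' hnin']
      rw [htake0, decide_eq_false hnsuf]
      push_cast
      ring


-- ===== VERDICT (by name: the statement is the Claim_ definition above) =====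
theorem solution_spec : Claim_unchanged_solution := by
  unfold Claim_unchanged_solution
  intro myString pat _
  unfold Spec_solution
  intro hnD
  unfold D_solution at hnD
  have hne : pat.toList ≠ [] := fun h => hnD (Or.inl h)
  have hD1 : pat.toList.length = 1 →
      ((myString.toList.dropWhile (· ≠ pat.toList.headI)).any (· ≠ pat.toList.headI)) ≠ true :=
    fun h1 h2 => hnD (Or.inr ⟨h1, h2⟩)
  simp only [solution, solution_alt]
  set s := myString.toList with hs
  set p := pat.toList with hp
  have hm1 : 1 ≤ p.length := by
    cases hpl : p with
    | nil => exact absurd hpl hne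
    | cons a l => simp
  rw [pv_loop2 s p]
  rw [pv_loopB s p hm1]
  rw [← pv_count_ends_eq_starts s p hm1]
  have hfirst : (s.foldl (stepA p) ([], 0)).2
      = ((List.range s.length).countP fun j => decide (p <:+ s.take (j + 1)) : Nat) := by
    by_cases hm2 : 2 ≤ p.length
    · rw [pv_loop1 p hm2 s [] [] 0 List.nil_suffix (Or.inl rfl)
        (fun hcon => by
          have := hcon.length_le
          simp only [List.length_nil, Nat.le_zero] at this
          omega)]
      simp only [List.nil_append, List.length_nil, zero_add]
    · have hone : p.length = 1 := by omega
      obtain ⟨c, hc⟩ := List.length_eq_one_iff.mp hone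
      have hany : ((s.dropWhile (· ≠ c)).any (· ≠ c)) = false := by
        rw [← Bool.not_eq_true]
        have hhead : c = p.headI := by rw [hc]; rfl
        rw [hhead]
        exact hD1 hone
      rw [pv_loop1_one p hone s [] 0]
      simp only [List.nil_append, List.length_nil, zero_add]
      congr 1
      apply List.countP_congr
      intro j hj
      simp only [List.mem_range] at hj
      rw [hc, pv_isIn_take_iff_suffix s c j hany hj]
  rw [hfirst]
  ring

theorem solution_changed : Claim_changed_solution := by
  unfold Claim_changed_solution; decide
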